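-- pv_equiv track=rewrite | github.com/locou/bgg-compare | bgg_collection.py | build_collection_url
-- ===== SOURCE A (Python) =====
-- def build_url(parameters):
--     # first entry has to be a username
--     url = ""
--     for key, parameter in enumerate(parameters):
--         if key == 0:
--             url += parameter[0]
--         elif key == 1:
--             url += "?" + parameter[1] + "=" + parameter[0]
--         else:
--             url += "&" + parameter[1] + "=" + parameter[0]
--     return url
--
-- def build_collection_url(loading_status):
--     if len(loading_status) > 1:
--         for user_status in loading_status:
--             # move the user to the front of the list
--             user_list = [u["username"] for u in loading_status]
--             user_list.insert(0, user_list.pop(user_list.index(user_status["username"])))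
--
--             parameters = list()
--             for user in user_list:
--                 parameters.append((user, "add_user"))
--             user_status["collection_url"] = build_url(parameters)
--
--             # remove user from list
--             remove_list = [u["username"] for u in loading_status]
--             remove_list.pop(remove_list.index(user_status["username"]))
--             parameters = list()
--             for user in remove_list:
--                 parameters.append((user, "add_user"))
--             user_status["remove_collection_url"] = build_url(parameters)
--         return loading_status
--     elif loading_status:
--         loading_status[0]["collection_url"] = None
--         loading_status[0]["remove_collection_url"] = None
--     return loading_status
-- ===== SOURCE B (Python) =====
-- def build_collection_url(loading_status):
--     if len(loading_status) > 1:
--         names = [u["username"] for u in loading_status]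
--         for user_status in loading_status:
--             name = user_status["username"]
--             j = names.index(name)
--             rest = names[:j] + names[j + 1:]
--             user_status["collection_url"] = name + "?add_user=" + "&add_user=".join(rest)
--             tail = rest[1:]
--             user_status["remove_collection_url"] = rest[0] + ("?add_user=" + "&add_user=".join(tail) if tail else "")
--     elif loading_status:
--         loading_status[0]["collection_url"] = None
--         loading_status[0]["remove_collection_url"] = None
--     return loading_status
-- ===== Notes on version B (the rewrite author's own statement) =====
-- stated objective: simpler
-- what changed: B computes the username list once before the loop and builds each URL by slicing out the current user's first occurrence and string-joining the rest with '&add_user=', replacing A's per-user list comprehensions, index/pop/insert list surgery and the enumerate-keyed build_url accumulator loop.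
import Mathlib
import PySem

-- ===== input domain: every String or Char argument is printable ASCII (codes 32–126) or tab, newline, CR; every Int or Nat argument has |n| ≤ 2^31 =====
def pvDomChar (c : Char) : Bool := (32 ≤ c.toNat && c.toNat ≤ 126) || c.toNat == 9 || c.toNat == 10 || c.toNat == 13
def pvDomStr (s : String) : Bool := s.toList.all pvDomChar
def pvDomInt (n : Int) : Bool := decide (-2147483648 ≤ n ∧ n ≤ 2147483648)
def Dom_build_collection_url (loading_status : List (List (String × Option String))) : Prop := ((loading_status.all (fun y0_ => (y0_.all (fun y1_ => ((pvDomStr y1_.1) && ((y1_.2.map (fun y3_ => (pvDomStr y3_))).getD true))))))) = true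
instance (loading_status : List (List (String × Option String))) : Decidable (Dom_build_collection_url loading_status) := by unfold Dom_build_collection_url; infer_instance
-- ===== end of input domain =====

-- B replaces A's per-user pop/insert list surgery and the enumerate-keyed build_url loop by a
-- names list computed once, slicing out the first occurrence, and a single string join (simpler).
-- A mutates the dicts in place and returns the same list; the equivalence proved here is about
-- the returned value (B performs the same in-place mutation in Python).

-- ===== PORT A =====
-- d["username"] : KeyError (get? = none) and a None value both make Python A raise later;
-- both are excluded by Pre_, the "" default is never relied on inside Pre_.
def pyUsername (d : List (String × Option String)) : String :=
  match (PySem.Dict.mk d).get? "username" with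
  | some (some s) => s
  | _ => ""

-- the loop body of A's build_url (url += …), on List Char (Python str concatenation, exact)
def pyBuildUrlStep (url : List Char) (kp : Int × (String × String)) : List Char :=
  if kp.1 == 0 then url ++ kp.2.1.toList
  else if kp.1 == 1 then url ++ '?' :: (kp.2.2.toList ++ '=' :: kp.2.1.toList)
  else url ++ '&' :: (kp.2.2.toList ++ '=' :: kp.2.1.toList)

-- A's build_url: for key, parameter in enumerate(parameters): …
def pyBuildUrl (parameters : List (String × String)) : List Char :=
  (PySem.List.enumerate parameters).foldl pyBuildUrlStep []

-- the body of A's "for user_status in loading_status" loop: ls is the CURRENT list, d the current dict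
def processA (ls : List (List (String × Option String))) (d : List (String × Option String)) :
    List (String × Option String) :=
  let user_list0 := ls.map pyUsername
  let name := pyUsername d
  -- user_list.insert(0, user_list.pop(user_list.index(name)))
  let user_list :=
    match PySem.List.index? user_list0 name with
    | some i =>
      match PySem.List.pop? user_list0 (i : Int) with
      | some (popped, rest) => PySem.List.insert rest 0 popped
      | none => user_list0
    | none => user_list0
  let parameters := user_list.map (fun u => (u, "add_user"))
  let d1 := ((PySem.Dict.mk d).insert "collection_url" (some (String.ofList (pyBuildUrl parameters)))).items
  -- remove_list.pop(remove_list.index(name))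
  let remove_list :=
    match PySem.List.index? user_list0 name with
    | some i =>
      match PySem.List.pop? user_list0 (i : Int) with
      | some (_, rest) => rest
      | none => user_list0
    | none => user_list0
  let parameters2 := remove_list.map (fun u => (u, "add_user"))
  ((PySem.Dict.mk d1).insert "remove_collection_url" (some (String.ofList (pyBuildUrl parameters2)))).items

-- the in-place loop: done = already-mutated prefix, the current full list is done ++ rest
def loopA (done : List (List (String × Option String))) :
    List (List (String × Option String)) → List (List (String × Option String))
  | [] => done
  | d :: rest => loopA (done ++ [processA (done ++ d :: rest) d]) rest

def build_collection_url (loading_status : List (List (String × Option String))) : List (List (String × Option String)) :=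
  if loading_status.length > 1 then
    loopA [] loading_status
  else
    match loading_status with
    | [] => loading_status
    | d :: rest =>
      (((PySem.Dict.mk d).insert "collection_url" none).insert "remove_collection_url" none).items :: rest

-- ===== PORT B =====
-- B's per-user step; names = the username list computed once before the loop
def stepB (names : List String) (d : List (String × Option String)) : List (String × Option String) :=
  let name := pyUsername d
  let j := (PySem.List.index? names name).getD 0   -- names.index(name); name is always in names here
  let rest := PySem.List.slice names none (some (j : Int)) ++ PySem.List.slice names (some ((j : Int) + 1)) none
  let d1 := ((PySem.Dict.mk d).insert "collection_url"
      (some (String.ofList (name.toList ++ "?add_user=".toList ++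
        PySem.Chars.join "&add_user=".toList (rest.map String.toList))))).items
  let tail := PySem.List.slice rest (some 1) none
  -- rest[0]: rest is never empty when stepB is reached (the list has ≥ 2 users), so headD's
  -- default is unreachable (Python B would raise IndexError there)
  ((PySem.Dict.mk d1).insert "remove_collection_url"
      (some (String.ofList ((rest.headD "").toList ++
        (if tail.isEmpty then [] else
          "?add_user=".toList ++ PySem.Chars.join "&add_user=".toList (tail.map String.toList)))))).items

def build_collection_url_alt (loading_status : List (List (String × Option String))) : List (List (String × Option String)) :=
  if loading_status.length > 1 then
    let names := loading_status.map pyUsername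
    loading_status.map (stepB names)
  else
    match loading_status with
    | [] => loading_status
    | d :: rest =>
      (((PySem.Dict.mk d).insert "collection_url" none).insert "remove_collection_url" none).items :: rest

-- ===== PRECONDITION & SPEC =====
-- When the list has ≥ 2 users, Python A raises (KeyError / TypeError) unless every dict has
-- key "username" with a non-None value; with ≤ 1 entries no username is ever read.
def Pre_build_collection_url (loading_status : List (List (String × Option String))) : Prop :=
  loading_status.length ≤ 1 ∨
    (loading_status.all (fun d =>
      match (PySem.Dict.mk d).get? "username" with
      | some (some _) => true
      | _ => false)) = true
instance (loading_status : List (List (String × Option String))) : Decidable (Pre_build_collection_url loading_status) := by unfold Pre_build_collection_url; infer_instance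

def pvWitness_build_collection_url : (List (List (String × Option String))) :=
  [[("username", some "alice")], [("username", some "bob"), ("x", none)], [("username", some "alice")]]

def Spec_build_collection_url (loading_status : List (List (String × Option String))) (out : List (List (String × Option String))) : Prop := out = build_collection_url_alt loading_status
instance (loading_status : List (List (String × Option String))) (out : List (List (String × Option String))) : Decidable (Spec_build_collection_url loading_status out) := by unfold Spec_build_collection_url; infer_instance

-- ===== CLAIM (what is proved, stated in full; the proofs are below) =====
def Claim_equal_build_collection_url : Prop := ∀ (loading_status : List (List (String × Option String))), Dom_build_collection_url loading_status → Pre_build_collection_url loading_status → Spec_build_collection_url loading_status (build_collection_url loading_status)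

-- ===== LEMMAS AND PROOFS =====

-- inserting the two url keys never changes the username
theorem pyUsername_processA (ls : List (List (String × Option String)))
    (d : List (String × Option String)) : pyUsername (processA ls d) = pyUsername d := by
  unfold pyUsername processA
  rw [PySem.Dict.get?_insert_of_ne _ _ (by decide), PySem.Dict.get?_insert_of_ne _ _ (by decide)]

-- keys ≥ 2 of A's build_url loop: each later parameter appends "&add_user=" ++ user
theorem buildUrl_tail (ps : List (String × String)) (s : Int) (hs : 2 ≤ s) (url : List Char) :
    (PySem.List.enumerate ps s).foldl pyBuildUrlStep url =
      url ++ (ps.map (fun p => '&' :: (p.2.toList ++ '=' :: p.1.toList))).flatten := by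
  induction ps generalizing s url with
  | nil => simp [PySem.List.enumerate]
  | cons p t ih =>
    rw [PySem.List.enumerate_cons, List.foldl_cons, ih (s + 1) (by omega)]
    have h0 : (s == 0) = false := by simp; omega
    have h1 : (s == 1) = false := by simp; omega
    simp [pyBuildUrlStep, h0, h1]

-- closed form of A's build_url on a (u, "add_user") parameter list
theorem pyBuildUrl_eq (us : List String) :
    pyBuildUrl (us.map (fun u => (u, "add_user"))) =
      match us with
      | [] => []
      | [u] => u.toList
      | u :: v :: ws => u.toList ++ "?add_user=".toList ++
          PySem.Chars.join "&add_user=".toList ((v :: ws).map String.toList) := by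
  match us with
  | [] => rfl
  | [u] =>
    simp only [List.map_cons, List.map_nil, pyBuildUrl, PySem.List.enumerate_cons,
      PySem.List.enumerate_nil, List.foldl_cons, List.foldl_nil]
    simp [pyBuildUrlStep]
  | u :: v :: ws =>
    simp only [List.map_cons, pyBuildUrl, PySem.List.enumerate_cons, List.foldl_cons]
    rw [show (0 : Int) + 1 + 1 = 2 by norm_num, buildUrl_tail _ 2 (by norm_num)]
    have hj : ∀ (v : String) (ws : List String),
        PySem.Chars.join "&add_user=".toList (v.toList :: ws.map String.toList) =
          v.toList ++ (ws.map (fun w => '&' :: ("add_user".toList ++ '=' :: w.toList))).flatten := by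
      intro v ws
      induction ws generalizing v with
      | nil => simp [PySem.Chars.join_singleton]
      | cons w t ih =>
        rw [List.map_cons, PySem.Chars.join_cons_cons, ih w]
        simp [show "&add_user=".toList = '&' :: ("add_user".toList ++ ['=']) by decide]
    rw [hj]
    simp [pyBuildUrlStep,
      show "?add_user=".toList = '?' :: ("add_user".toList ++ ['=']) by decide,
      show "add_user".toList = ['a','d','d','_','u','s','e','r'] by decide]
    congr 2
    funext w
    simp [show "add_user".toList = ['a','d','d','_','u','s','e','r'] by decide]

theorem eraseIdx_append_cons {α : Type} (pre suf : List α) (v : α) :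
    (pre ++ v :: suf).eraseIdx pre.length = pre ++ suf := by
  induction pre with
  | nil => simp
  | cons a t ih => simp [ih]

theorem drop_length_succ_append_cons {α : Type} (pre suf : List α) (v : α) :
    (pre ++ v :: suf).drop (pre.length + 1) = suf := by
  rw [show pre ++ v :: suf = (pre ++ [v]) ++ suf by simp,
    show pre.length + 1 = (pre ++ [v]).length by simp]
  exact List.drop_left

-- the heart: on a list of ≥ 2 users, A's per-user body equals B's per-user step
theorem processA_eq_stepB (full : List (List (String × Option String)))
    (d : List (String × Option String)) (hd : d ∈ full) (hlen : 2 ≤ full.length) :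
    processA full d = stepB (full.map pyUsername) d := by
  set names := full.map pyUsername with hnames
  have hmem : pyUsername d ∈ names := hnames ▸ List.mem_map_of_mem hd
  obtain ⟨j, hj⟩ : ∃ j, PySem.List.index? names (pyUsername d) = some j := by
    have := (PySem.List.index?_isSome_iff names (pyUsername d)).mpr hmem
    exact Option.isSome_iff_exists.mp this
  obtain ⟨pre, suf, hsplit, hjlen, -⟩ := (PySem.List.index?_eq_some_iff names (pyUsername d) j).mp hj
  have hjlt : j < names.length := by rw [hsplit]; simp; omega
  have hpop : PySem.List.pop? names (j : Int) = some (names[j], names.eraseIdx j) :=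
    PySem.List.pop?_natCast names j hjlt
  have hget : names[j] = pyUsername d := by
    obtain ⟨hk, hv, -⟩ := PySem.List.getElem_of_index?_eq_some hj
    exact hv
  have herase : names.eraseIdx j = pre ++ suf := by
    rw [hsplit, ← hjlen]; exact eraseIdx_append_cons pre suf _
  have htake : names.take j = pre := by rw [hsplit, ← hjlen]; exact List.take_left
  have hdrop : names.drop (j + 1) = suf := by
    rw [hsplit, ← hjlen]; exact drop_length_succ_append_cons pre suf _
  -- rest = pre ++ suf is nonempty since names has ≥ 2 elements
  have hne : pre ++ suf ≠ [] := by
    have : 2 ≤ names.length := by rw [hnames]; simpa using hlen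
    rw [hsplit] at this; simp at this
    intro h; rw [List.append_eq_nil_iff] at h; simp [h.1, h.2] at this
  obtain ⟨r0, rs, hrest⟩ : ∃ r0 rs, pre ++ suf = r0 :: rs := by
    cases h : pre ++ suf with
    | nil => exact absurd h hne
    | cons a t => exact ⟨a, t, rfl⟩
  unfold processA stepB
  simp only [← hnames, hj, hpop, hget, Option.getD_some]
  rw [show ((j : Int) + 1) = ((j + 1 : Nat) : Int) by push_cast; ring]
  rw [PySem.List.slice_to_natCast, PySem.List.slice_from_natCast, htake, hdrop, herase,
    PySem.List.insert_zero, PySem.List.slice_from_one]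
  rw [hrest]
  rw [pyBuildUrl_eq, pyBuildUrl_eq]
  cases rs with
  | nil => simp [PySem.Chars.join_singleton]
  | cons r1 rt =>
    simp only [List.map_cons, List.headD_cons, List.tail_cons, List.isEmpty_cons]
    congr 3
    simp

-- the loop with an already-processed prefix equals mapping stepB over the remainder
theorem loopA_eq_map (names : List String) :
    ∀ (cur done : List (List (String × Option String))),
      (done ++ cur).map pyUsername = names → 2 ≤ names.length →
      loopA done cur = done ++ cur.map (stepB names) := by
  intro cur
  induction cur with
  | nil => intro done _ _; simp [loopA]
  | cons d rest ih =>
    intro done hinv hlen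
    rw [loopA, List.map_cons]
    have hstep : processA (done ++ d :: rest) d = stepB names d := by
      rw [← hinv]
      exact processA_eq_stepB _ d (by simp) (by
        have := congrArg List.length hinv
        simp only [List.length_map, List.length_append, List.length_cons] at this ⊢
        omega)
    rw [hstep]
    have : (done ++ [stepB names d] ++ rest).map pyUsername = names := by
      rw [← hstep, ← hinv]
      simp [pyUsername_processA]
    rw [ih (done ++ [stepB names d]) this hlen]
    simp

-- ===== VERDICT (by name: the statement is the Claim_ definition above) =====
theorem build_collection_url_spec : Claim_equal_build_collection_url := by
  intro ls _ _
  unfold Spec_build_collection_url build_collection_url build_collection_url_alt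
  by_cases h : ls.length > 1
  · rw [if_pos h, if_pos h]
    exact loopA_eq_map (ls.map pyUsername) ls [] (by simp) (by simp; omega)
  · rw [if_neg h, if_neg h]
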